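-- pv_equiv track=rewrite | github.com/Ghazi-nk/invoice-idp-prototype | app/document_digitalization/layoutlmv3_png2txt.py | _chunk_line
-- ===== SOURCE A (Python) =====
-- from typing import List, Dict
--
-- def _chunk_line(tokens: List[Dict], thresh: int) -> List[List[Dict]]:
--     """
--     Zerlegt eine einzelne Zeile in Chunks nach thresh.
--     """
--     chunks = []
--     current = [tokens[0]]
--     for tok in tokens[1:]:
--         if tok["bbox"][0] - current[-1]["bbox"][2] > thresh:
--             chunks.append(current)
--             current = [tok]
--         else:
--             current.append(tok)
--     chunks.append(current)
--     return chunks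
-- ===== SOURCE B (Python) =====
-- from typing import List, Dict
--
-- def _chunk_line(tokens: List[Dict], thresh: int) -> List[List[Dict]]:
--     breaks = [i for i in range(1, len(tokens))
--               if tokens[i]["bbox"][0] - tokens[i - 1]["bbox"][2] > thresh]
--     bounds = [0] + breaks + [len(tokens)]
--     return [tokens[a:b] for a, b in zip(bounds, bounds[1:])]
-- ===== Notes on version B (the rewrite author's own statement) =====
-- stated objective: alternative
-- what changed: B replaces A's single accumulating pass (growing 'current' and flushing it into 'chunks') by two passes: first compute the list of break indices where the horizontal gap exceeds thresh, then cut the token list into slices at those boundaries.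
import Mathlib
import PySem

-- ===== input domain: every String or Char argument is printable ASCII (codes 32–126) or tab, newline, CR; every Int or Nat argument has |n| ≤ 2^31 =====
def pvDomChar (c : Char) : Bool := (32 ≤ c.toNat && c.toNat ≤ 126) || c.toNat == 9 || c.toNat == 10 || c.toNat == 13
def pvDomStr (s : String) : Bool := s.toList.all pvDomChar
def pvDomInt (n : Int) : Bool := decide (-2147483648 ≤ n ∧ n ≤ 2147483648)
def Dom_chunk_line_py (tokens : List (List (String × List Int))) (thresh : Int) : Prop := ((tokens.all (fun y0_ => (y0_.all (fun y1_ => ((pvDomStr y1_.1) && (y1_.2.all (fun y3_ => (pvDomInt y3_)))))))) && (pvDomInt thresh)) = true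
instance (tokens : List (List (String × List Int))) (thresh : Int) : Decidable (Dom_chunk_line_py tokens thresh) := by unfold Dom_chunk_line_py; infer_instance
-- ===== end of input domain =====

-- B is a two-pass alternative (break indices, then slicing) of equal cost; equivalence is about
-- the return value on nonempty inputs with valid "bbox" entries (Pre_ below).

-- tok["bbox"]: first-match lookup in the association list; missing key gives [] (only outside Pre_)
def pvBbox (t : List (String × List Int)) : List Int :=
  ((t.find? (fun p => p.1 == "bbox")).map (·.2)).getD []

-- tok["bbox"][0] / tok["bbox"][2]; the default 0 is reached only outside Pre_
def pvB0 (t : List (String × List Int)) : Int := (PySem.List.pyGet? (pvBbox t) 0).getD 0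
def pvB2 (t : List (String × List Int)) : Int := (PySem.List.pyGet? (pvBbox t) 2).getD 0

-- ===== PORT A =====
def chunk_line_py (tokens : List (List (String × List Int))) (thresh : Int) : List (List (List (String × List Int))) :=
  match tokens with
  | [] => []          -- Python raises IndexError on tokens[0]; excluded by Pre_
  | t0 :: rest =>
    -- state = (chunks, current); current[-1] via pyGet? · (-1) (nonempty, so the default [] is dead)
    let st := rest.foldl
      (fun (st : List (List (List (String × List Int))) × List (List (String × List Int))) tok =>
        if pvB0 tok - pvB2 ((PySem.List.pyGet? st.2 (-1)).getD []) > thresh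
        then (st.1 ++ [st.2], [tok])
        else (st.1, st.2 ++ [tok]))
      ([], [t0])
    st.1 ++ [st.2]

-- ===== PORT B =====
def chunk_line_py_alt (tokens : List (List (String × List Int))) (thresh : Int) : List (List (List (String × List Int))) :=
  let n : Int := tokens.length
  let breaks := (PySem.List.pyRange 1 n 1).filter (fun i =>
    pvB0 ((PySem.List.pyGet? tokens i).getD []) - pvB2 ((PySem.List.pyGet? tokens (i - 1)).getD []) > thresh)
  let bounds := 0 :: (breaks ++ [n])
  (bounds.zip (breaks ++ [n])).map (fun p => PySem.List.slice tokens (some p.1) (some p.2))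

-- ===== PRECONDITION & SPEC =====
-- Pre_ excludes exactly the inputs on which Python A raises: the empty token list (IndexError on
-- tokens[0]) and tokens whose accessed "bbox" entry is missing (KeyError) or too short (IndexError):
-- every token but the first needs bbox[0], every token but the last needs bbox[2].
def Pre_chunk_line_py (tokens : List (List (String × List Int))) (thresh : Int) : Prop :=
  tokens ≠ [] ∧ (∀ t ∈ tokens.tail, 1 ≤ (pvBbox t).length) ∧ (∀ t ∈ tokens.dropLast, 3 ≤ (pvBbox t).length)
instance (tokens : List (List (String × List Int))) (thresh : Int) : Decidable (Pre_chunk_line_py tokens thresh) := by unfold Pre_chunk_line_py; infer_instance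

def pvWitness_chunk_line_py : (List (List (String × List Int))) × Int :=
  ([[("bbox", [0, 0, 2, 1])], [("bbox", [5, 0, 7, 1])]], 2)

def Spec_chunk_line_py (tokens : List (List (String × List Int))) (thresh : Int) (out : List (List (List (String × List Int)))) : Prop := out = chunk_line_py_alt tokens thresh
instance (tokens : List (List (String × List Int))) (thresh : Int) (out : List (List (List (String × List Int)))) : Decidable (Spec_chunk_line_py tokens thresh out) := by unfold Spec_chunk_line_py; infer_instance

-- ===== CLAIM (what is proved, stated in full; the proofs are below) =====
def Claim_equal_chunk_line_py : Prop := ∀ (tokens : List (List (String × List Int))) (thresh : Int), Dom_chunk_line_py tokens thresh → Pre_chunk_line_py tokens thresh → Spec_chunk_line_py tokens thresh (chunk_line_py tokens thresh)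

-- ===== LEMMAS AND PROOFS =====

-- the Nat positions (counted in the whole line) at which a new chunk starts, for the suffix
-- starting at position k
def pvCuts (thresh : Int) (k : Nat) : List (List (String × List Int)) → List Nat
  | a :: b :: ts => (if pvB0 b - pvB2 a > thresh then [k + 1] else []) ++ pvCuts thresh (k + 1) (b :: ts)
  | _ => []

-- cut xs at consecutive bounds
def pvSlicesAt (xs : List (List (String × List Int))) : List Nat → List (List (List (String × List Int)))
  | a :: b :: rest => ((xs.drop a).take (b - a)) :: pvSlicesAt xs (b :: rest)
  | _ => []

-- greedy grouping, the common recursive shape of both programs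
def pvGo (thresh : Int) (cur : List (List (String × List Int))) (prev : List (String × List Int)) :
    List (List (String × List Int)) → List (List (List (String × List Int)))
  | [] => [cur]
  | t :: ts =>
    if pvB0 t - pvB2 prev > thresh then cur :: pvGo thresh [t] t ts
    else pvGo thresh (cur ++ [t]) t ts

theorem pvA_fold_eq_go (thresh : Int) (rest : List (List (String × List Int))) :
    ∀ (cs : List (List (List (String × List Int)))) (cur : List (List (String × List Int)))
      (prev : List (String × List Int)), cur.getLast? = some prev →
    ((rest.foldl
        (fun (st : List (List (List (String × List Int))) × List (List (String × List Int))) tok =>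
          if pvB0 tok - pvB2 ((PySem.List.pyGet? st.2 (-1)).getD []) > thresh
          then (st.1 ++ [st.2], [tok])
          else (st.1, st.2 ++ [tok])) (cs, cur)).1
      ++ [(rest.foldl
        (fun (st : List (List (List (String × List Int))) × List (List (String × List Int))) tok =>
          if pvB0 tok - pvB2 ((PySem.List.pyGet? st.2 (-1)).getD []) > thresh
          then (st.1 ++ [st.2], [tok])
          else (st.1, st.2 ++ [tok])) (cs, cur)).2])
      = cs ++ pvGo thresh cur prev rest := by
  induction rest with
  | nil => intro cs cur prev _; simp [pvGo]
  | cons t ts ih =>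
    intro cs cur prev hlast
    have hc : (PySem.List.pyGet? cur (-1)).getD [] = prev := by
      simp [PySem.List.pyGet?_neg_one, hlast]
    rw [List.foldl_cons]
    dsimp only
    rw [hc]
    by_cases h : pvB0 t - pvB2 prev > thresh
    · rw [if_pos h]
      rw [ih (cs ++ [cur]) [t] t (by simp)]
      simp [pvGo, if_pos h]
    · rw [if_neg h]
      rw [ih cs (cur ++ [t]) t (by simp)]
      simp [pvGo, if_neg h]

theorem pvGo_eq_slices (thresh : Int) (xs : List (List (String × List Int))) :
    ∀ (m j k : Nat), k < xs.length → j ≤ k → m = xs.length - k →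
    pvGo thresh ((xs.drop j).take (k + 1 - j)) (xs.getD k []) (xs.drop (k + 1)) =
      pvSlicesAt xs (j :: (pvCuts thresh k (xs.drop k) ++ [xs.length])) := by
  intro m
  induction m with
  | zero => intro j k hk _ hm; omega
  | succ m ih =>
    intro j k hk hjk hm
    by_cases hk1 : k + 1 < xs.length
    · have hdk : xs.drop k = xs.getD k [] :: (xs.getD (k+1) [] :: xs.drop (k + 2)) := by
        rw [List.getD_eq_getElem _ _ hk, List.getD_eq_getElem _ _ hk1,
          List.drop_eq_getElem_cons hk, List.drop_eq_getElem_cons hk1]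
      have hdk1 : xs.drop (k + 1) = xs.getD (k+1) [] :: xs.drop (k + 2) := by
        rw [List.getD_eq_getElem _ _ hk1, List.drop_eq_getElem_cons hk1]
      rw [hdk1, hdk]
      simp only [pvCuts, pvGo]
      by_cases hgap : pvB0 (xs.getD (k+1) []) - pvB2 (xs.getD k []) > thresh
      · simp only [if_pos hgap]
        have h1 : (xs.drop (k+1)).take (k + 1 + 1 - (k+1)) = [xs.getD (k+1) []] := by
          rw [hdk1]; simp
        have hrec := ih (k+1) (k+1) hk1 le_rfl (by omega)
        rw [h1, hdk1] at hrec
        rw [hrec]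
        simp [pvSlicesAt]
      · simp only [if_neg hgap]
        have h2 : (xs.drop j).take (k + 1 - j) ++ [xs.getD (k+1) []] = (xs.drop j).take (k + 1 + 1 - j) := by
          have h3 : k + 1 + 1 - j = (k + 1 - j) + 1 := by omega
          rw [h3, List.take_add_one]
          congr 1
          rw [List.getElem?_drop]
          have hj1 : j + (k + 1 - j) = k + 1 := by omega
          rw [hj1, List.getElem?_eq_getElem hk1, List.getD_eq_getElem _ _ hk1]
          rfl
        have hrec := ih j (k+1) hk1 (by omega) (by omega)
        rw [hdk1] at hrec
        rw [h2, hrec]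
        simp
    · have hlen : xs.length = k + 1 := by omega
      have hdrop : xs.drop (k + 1) = [] := by
        apply List.drop_eq_nil_of_le; omega
      have hdk : xs.drop k = [xs.getD k []] := by
        rw [List.getD_eq_getElem _ _ hk, List.drop_eq_getElem_cons hk, hdrop]
      rw [hdrop, hdk]
      simp [pvGo, pvCuts, pvSlicesAt, hlen]

theorem pvBreaks_eq_cuts (thresh : Int) (xs : List (List (String × List Int))) :
    ∀ (m k : Nat), k < xs.length → m = xs.length - k →
    ((PySem.List.pyRange ((k : Int) + 1) (xs.length : Int) 1).filter (fun i =>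
        pvB0 ((PySem.List.pyGet? xs i).getD []) - pvB2 ((PySem.List.pyGet? xs (i - 1)).getD []) > thresh))
      = (pvCuts thresh k (xs.drop k)).map (fun n : Nat => (n : Int)) := by
  intro m
  induction m with
  | zero => intro k hk hm; omega
  | succ m ih =>
    intro k hk hm
    by_cases hk1 : k + 1 < xs.length
    · have hdk : xs.drop k = xs[k] :: (xs[k+1] :: xs.drop (k + 2)) := by
        rw [List.drop_eq_getElem_cons hk, List.drop_eq_getElem_cons hk1]
      rw [PySem.List.pyRange_one_cons (by exact_mod_cast hk1), List.filter_cons]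
      have e1 : ((k : Int) + 1) = ((k + 1 : Nat) : Int) := by push_cast; ring
      have hget1 : (PySem.List.pyGet? xs ((k : Int) + 1)).getD [] = xs[k+1] := by
        rw [e1, PySem.List.pyGet?_natCast, List.getElem?_eq_getElem hk1]; rfl
      have hget0 : (PySem.List.pyGet? xs ((k : Int) + 1 - 1)).getD [] = xs[k] := by
        have e2 : ((k : Int) + 1 - 1) = ((k : Nat) : Int) := by omega
        rw [e2, PySem.List.pyGet?_natCast, List.getElem?_eq_getElem hk]; rfl
      have hrec := ih (k + 1) hk1 (by omega)
      rw [← e1] at hrec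
      have hdk1 : xs.drop (k+1) = xs[k+1] :: xs.drop (k + 2) := List.drop_eq_getElem_cons hk1
      rw [hdk1] at hrec
      rw [hget1, hget0, hdk]
      simp only [pvCuts]
      by_cases hgap : pvB0 xs[k+1] - pvB2 xs[k] > thresh
      · rw [if_pos (by simpa using hgap), if_pos hgap, hrec, List.map_append, e1]
        rfl
      · rw [if_neg (by simpa using hgap), if_neg hgap]
        simpa using hrec
    · have hlen : xs.length = k + 1 := by omega
      have hnil : PySem.List.pyRange ((k : Int) + 1) (xs.length : Int) 1 = [] := by
        apply PySem.List.pyRange_one_eq_nil; rw [hlen]; omega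
      have hdk : xs.drop k = [xs[k]] := by
        rw [List.drop_eq_getElem_cons hk]
        have : xs.drop (k + 1) = [] := by apply List.drop_eq_nil_of_le; omega
        rw [this]
      rw [hnil, hdk]
      simp [pvCuts]

theorem pvZip_slices (xs : List (List (String × List Int))) :
    ∀ (l : List Nat) (a : Nat),
    ((((a :: l).map (fun n : Nat => (n : Int))).zip (l.map (fun n : Nat => (n : Int)))).map
        (fun p => PySem.List.slice xs (some p.1) (some p.2))) = pvSlicesAt xs (a :: l) := by
  intro l
  induction l with
  | nil => intro a; simp [pvSlicesAt]
  | cons b r ih =>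
    intro a
    rw [List.map_cons, List.map_cons, List.zip_cons_cons, List.map_cons]
    rw [PySem.List.slice_natCast]
    exact congrArg _ (ih b)

theorem pvAlt_eq_slices (thresh : Int) (xs : List (List (String × List Int))) (hne : xs ≠ []) :
    chunk_line_py_alt xs thresh = pvSlicesAt xs (0 :: (pvCuts thresh 0 xs ++ [xs.length])) := by
  have hk : 0 < xs.length := List.length_pos_iff.mpr hne
  have hb := pvBreaks_eq_cuts thresh xs xs.length 0 hk (by omega)
  simp only [Nat.cast_zero, zero_add, List.drop_zero] at hb
  unfold chunk_line_py_alt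
  simp only [hb]
  have h2 : ((pvCuts thresh 0 xs).map (fun n : Nat => (n : Int)) ++ [(xs.length : Int)]) =
      (pvCuts thresh 0 xs ++ [xs.length]).map (fun n : Nat => (n : Int)) := by simp
  have h3 : ((0 : Int) :: (pvCuts thresh 0 xs ++ [xs.length]).map (fun n : Nat => (n : Int))) =
      ((0 : Nat) :: (pvCuts thresh 0 xs ++ [xs.length])).map (fun n : Nat => (n : Int)) := by simp
  rw [h2, h3]
  exact pvZip_slices xs (pvCuts thresh 0 xs ++ [xs.length]) 0

-- ===== VERDICT (by name: the statement is the Claim_ definition above) =====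
theorem chunk_line_py_spec : Claim_equal_chunk_line_py := by
  intro tokens thresh _ hpre
  unfold Spec_chunk_line_py
  obtain ⟨hne, -, -⟩ := hpre
  match tokens, hne with
  | t0 :: rest, _ =>
    show chunk_line_py (t0 :: rest) thresh = _
    have hA : chunk_line_py (t0 :: rest) thresh = [] ++ pvGo thresh [t0] t0 rest := by
      rw [← pvA_fold_eq_go thresh rest [] [t0] t0 (by simp)]
      rfl
    rw [hA, List.nil_append, pvAlt_eq_slices thresh (t0 :: rest) (by simp)]
    have h := pvGo_eq_slices thresh (t0 :: rest) ((t0 :: rest).length) 0 0 (by simp) le_rfl (by simp)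
    simpa using h
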